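-- pv_equiv track=rewrite | github.com/jpzgoku/projectEuler | python/20-29/problem27.py | consecutive_primes
-- ===== SOURCE A (Python) =====
-- import math
--
-- def is_it_prime(n):
--     if n < 0:
--         return False
--     half = math.ceil(n / 2) + 1
--     for i in range(2, half):
--         if n % i == 0:
--             return False
--     return True
--
-- def consecutive_primes(a, b):
--     arr = []
--     for n in range(1000):
--         v = (n**2 + (a * n)) + b
--         if is_it_prime(v):
--             arr.append(v)
--         else:
--             return arr
-- ===== SOURCE B (Python) =====
-- import math
--
-- def _passes(v):
--     # same acceptance as A's test: negatives fail, 0 and 1 pass, v >= 2 passes iff prime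
--     if v < 0:
--         return False
--     for i in range(2, math.isqrt(v) + 1):
--         if v % i == 0:
--             return False
--     return True
--
-- def consecutive_primes(a, b):
--     arr = []
--     v = b          # value of n**2 + a*n + b at n = 0
--     d = a + 1      # first finite difference v(n+1) - v(n) at n = 0
--     for _ in range(1000):
--         if not _passes(v):
--             return arr
--         arr.append(v)
--         v += d
--         d += 2
-- ===== Notes on version B (the rewrite author's own statement) =====
-- stated objective: alternative
-- what changed: The primality helper's trial-division bound drops from ceil(v/2) to isqrt(v), and the driver computes the quadratic's values incrementally by finite differences (v += d; d += 2) instead of evaluating n**2 + a*n + b at each n; Pre_ excludes only the inputs where all 1000 values pass A's test, on which both functions fall through the loop and return None instead of a list.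
import Mathlib
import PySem

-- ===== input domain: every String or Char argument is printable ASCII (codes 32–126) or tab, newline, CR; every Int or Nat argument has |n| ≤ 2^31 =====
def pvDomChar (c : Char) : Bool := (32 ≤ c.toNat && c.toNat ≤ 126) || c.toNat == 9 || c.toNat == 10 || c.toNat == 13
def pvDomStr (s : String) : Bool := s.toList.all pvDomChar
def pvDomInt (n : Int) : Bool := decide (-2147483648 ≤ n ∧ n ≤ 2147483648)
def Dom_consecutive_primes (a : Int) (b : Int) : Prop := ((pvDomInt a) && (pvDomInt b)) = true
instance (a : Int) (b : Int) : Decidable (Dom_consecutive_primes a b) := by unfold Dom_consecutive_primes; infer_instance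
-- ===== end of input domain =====

-- B replaces A's linear trial division (to ceil(v/2)) by trial division to isqrt(v) and
-- computes the quadratic's values incrementally by finite differences (objective: alternative;
-- the sqrt bound does asymptotically less work per test, but a timing run could not measure it).
-- Both Pythons fall through (return None) when all 1000 values pass; Pre_ excludes that.

-- ===== PORT A =====
-- the helper's 'for i in range(2, half): if n % i == 0: return False' loop, with i counting
-- up from 2 and (half - 2) iterations left (range is lazy in Python; a materialised list here
-- would make the port unevaluable on large n)
def trialA (n : Int) : Nat → Int → Bool
  | 0, _ => true
  | fuel+1, i => if PySem.Int.mod n i == 0 then false else trialA n fuel (i + 1)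

def isItPrimeA (n : Int) : Bool :=
  if n < 0 then false
  else
    -- math.ceil(n/2): exact here (|n| < 2^42 < 2^53, so the float n/2 is exact); = (n+1)//2
    let half := PySem.Int.floordiv (n + 1) 2 + 1
    trialA n (half - 2).toNat 2

def goA (a b : Int) : Nat → Int → List Int → List Int
  | 0, _, arr => arr   -- loop exhausted (Python returns None; excluded by Pre_)
  | fuel+1, n, arr =>
    let v := n ^ 2 + a * n + b
    if isItPrimeA v then goA a b fuel (n + 1) (arr ++ [v]) else arr

def consecutive_primes (a : Int) (b : Int) : List Int := goA a b 1000 0 []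

-- ===== PORT B =====
def passesB (v : Int) : Bool :=
  if v < 0 then false
  else
    -- math.isqrt(v) on v ≥ 0 is exactly Nat.sqrt
    (PySem.List.pyRange 2 ((Nat.sqrt v.toNat : Int) + 1) 1).all
      (fun i => !(PySem.Int.mod v i == 0))

def goB : Nat → Int → Int → List Int → List Int
  | 0, _, _, arr => arr   -- loop exhausted (Python returns None; excluded by Pre_)
  | fuel+1, v, d, arr =>
    if !(passesB v) then arr else goB fuel (v + d) (d + 2) (arr ++ [v])

def consecutive_primes_alt (a : Int) (b : Int) : List Int := goB 1000 b (a + 1) []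

-- ===== PRECONDITION & SPEC =====
-- Pre_ excludes exactly the inputs on which some value fails for no n < 1000, i.e. all 1000
-- values pass A's test: there both Pythons fall through the loop and return None, which is
-- not a List value.
def Pre_consecutive_primes (a : Int) (b : Int) : Prop :=
  ∃ n ∈ List.range' 0 1000,
    (let v := (n : Int) ^ 2 + a * n + b; v < 0 ∨ (2 ≤ v ∧ ¬ Nat.Prime v.toNat))
instance (a : Int) (b : Int) : Decidable (Pre_consecutive_primes a b) := by
  unfold Pre_consecutive_primes; infer_instance
def pvWitness_consecutive_primes : Int × Int := (0, 0)

def Spec_consecutive_primes (a : Int) (b : Int) (out : List Int) : Prop := out = consecutive_primes_alt a b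
instance (a : Int) (b : Int) (out : List Int) : Decidable (Spec_consecutive_primes a b out) := by unfold Spec_consecutive_primes; infer_instance

-- ===== CLAIM (what is proved, stated in full; the proofs are below) =====
def Claim_equal_consecutive_primes : Prop := ∀ (a : Int) (b : Int), Dom_consecutive_primes a b → Pre_consecutive_primes a b → Spec_consecutive_primes a b (consecutive_primes a b)

-- ===== LEMMAS AND PROOFS =====

-- no divisor up to isqrt m  ↔  no divisor up to (m+1)/2   (Nat form)
lemma no_div_sqrt_iff (m : Nat) :
    (∀ k, 2 ≤ k → k ≤ Nat.sqrt m → ¬ k ∣ m) ↔ (∀ k, 2 ≤ k → k ≤ (m + 1) / 2 → ¬ k ∣ m) := by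
  constructor
  · intro h k hk2 hkh hdvd
    obtain ⟨c, hc⟩ := hdvd
    have hm1 : 1 ≤ m := by omega
    have hc2 : 2 ≤ c := by
      rcases Nat.lt_or_ge c 2 with h2 | h2
      · interval_cases c
        · simp at hc; omega
        · simp at hc; omega
      · exact h2
    rcases le_total k c with hkc | hck
    · exact h k hk2 (Nat.le_sqrt.mpr (by nlinarith)) ⟨c, hc⟩
    · exact h c hc2 (Nat.le_sqrt.mpr (by nlinarith)) ⟨k, by rw [hc, Nat.mul_comm]⟩
  · intro h k hk2 hks
    have hkk : k * k ≤ m := Nat.le_sqrt.mp hks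
    have : 2 * k ≤ k * k := Nat.mul_le_mul_right k hk2
    exact h k hk2 (by omega)

-- the trial-division loop over range(2, t+1) as a bounded Nat statement
lemma all_iff (m t : Nat) :
    ((PySem.List.pyRange 2 ((t : Int) + 1) 1).all
        (fun i => !(PySem.Int.mod (m : Int) i == 0)) = true)
    ↔ (∀ k : Nat, 2 ≤ k → k ≤ t → ¬ k ∣ m) := by
  rw [List.all_eq_true]
  constructor
  · intro H k hk2 hkt hdvd
    have hmem : (k : Int) ∈ PySem.List.pyRange 2 ((t : Int) + 1) 1 := by
      rw [PySem.List.mem_pyRange_one]; omega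
    have := H (k : Int) hmem
    simp only [Bool.not_eq_eq_eq_not, Bool.not_true, beq_eq_false_iff_ne, ne_eq] at this
    rw [PySem.Int.mod_eq_zero_iff_dvd] at this
    exact this (Int.natCast_dvd_natCast.mpr hdvd)
  · intro H i hi
    rw [PySem.List.mem_pyRange_one] at hi
    have hnn : 0 ≤ i := by omega
    obtain ⟨k, rfl⟩ := Int.eq_ofNat_of_zero_le hnn
    have := H k (by omega) (by omega)
    simp only [Bool.not_eq_eq_eq_not, Bool.not_true, beq_eq_false_iff_ne, ne_eq]
    rw [PySem.Int.mod_eq_zero_iff_dvd]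
    exact fun hd => this (Int.natCast_dvd_natCast.mp hd)

-- the count-up trial loop as a bounded statement over Int
lemma trial_iff (n : Int) : ∀ (fuel : Nat) (i : Int),
    (trialA n fuel i = true) ↔ ∀ j : Int, i ≤ j → j < i + fuel → ¬ j ∣ n := by
  intro fuel
  induction fuel with
  | zero =>
    intro i
    simp only [trialA, true_iff]
    intro j h1 h2
    omega
  | succ f ih =>
    intro i
    rw [trialA]
    cases hmod : (PySem.Int.mod n i == 0) with
    | true =>
      simp only [if_true]
      rw [beq_iff_eq, PySem.Int.mod_eq_zero_iff_dvd] at hmod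
      constructor
      · intro h; cases h
      · intro H; exact absurd hmod (H i le_rfl (by omega))
    | false =>
      simp only [Bool.false_eq_true, if_false]
      rw [ih]
      have hnd : ¬ i ∣ n := fun hd => by
        rw [← PySem.Int.mod_eq_zero_iff_dvd] at hd
        simp [hd] at hmod
      constructor
      · intro H j h1 h2
        rcases eq_or_lt_of_le h1 with rfl | h1'
        · exact hnd
        · exact H j (by omega) (by omega)
      · intro H j h1 h2
        exact H j (by omega) (by omega)

-- the Int-quantified trial statement as a Nat one
lemma forall_int_iff (m t : Nat) :
    (∀ j : Int, 2 ≤ j → j < (t : Int) + 1 → ¬ j ∣ (m : Int)) ↔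
    (∀ k : Nat, 2 ≤ k → k ≤ t → ¬ k ∣ m) := by
  constructor
  · intro H k hk2 hkt hdvd
    exact H (k : Int) (by omega) (by omega) (Int.natCast_dvd_natCast.mpr hdvd)
  · intro H j h1 h2
    obtain ⟨k, rfl⟩ := Int.eq_ofNat_of_zero_le (by omega : (0:Int) ≤ j)
    exact fun hd => H k (by omega) (by omega) (Int.natCast_dvd_natCast.mp hd)

lemma pass_eq (v : Int) : isItPrimeA v = passesB v := by
  by_cases h0 : v = 0
  · subst h0; decide
  unfold isItPrimeA passesB
  by_cases hv : v < 0
  · simp [hv]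
  · simp only [hv, if_false]
    rw [Int.not_lt] at hv
    obtain ⟨m, rfl⟩ := Int.eq_ofNat_of_zero_le hv
    have hm1 : 1 ≤ m := by
      rcases Nat.eq_zero_or_pos m with rfl | h
      · exact absurd rfl h0
      · exact h
    have hhalf : PySem.Int.floordiv ((m : Int) + 1) 2 = (((m + 1) / 2 : Nat) : Int) := by
      rw [PySem.Int.floordiv_eq_ediv_of_pos (by norm_num)]
      norm_cast
    rw [hhalf]
    have hfuel : (((((m + 1) / 2 : Nat) : Int)) + 1 - 2).toNat = (m + 1) / 2 - 1 := by omega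
    rw [hfuel]
    simp only [Int.toNat_natCast]
    rw [Bool.eq_iff_iff, trial_iff, all_iff]
    have hb : (2 : Int) + ((m + 1) / 2 - 1 : Nat) = (((m + 1) / 2 : Nat) : Int) + 1 := by
      have : 1 ≤ (m + 1) / 2 := by omega
      omega
    rw [hb, forall_int_iff]
    exact (no_div_sqrt_iff m).symm

lemma go_eq (a b : Int) : ∀ (fuel : Nat) (n : Int) (arr : List Int),
    goA a b fuel n arr = goB fuel (n ^ 2 + a * n + b) (2 * n + a + 1) arr := by
  intro fuel
  induction fuel with
  | zero => intro n arr; rfl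
  | succ f ih =>
    intro n arr
    simp only [goA, goB]
    rw [pass_eq]
    cases hp : passesB (n ^ 2 + a * n + b) with
    | false => simp
    | true =>
      simp only [if_true, Bool.not_true, Bool.false_eq_true, if_false]
      rw [ih (n + 1)]
      congr 1 <;> ring

-- ===== VERDICT (by name: the statement is the Claim_ definition above) =====
theorem consecutive_primes_spec : Claim_equal_consecutive_primes := by
  intro a b _ _
  unfold Spec_consecutive_primes consecutive_primes consecutive_primes_alt
  have h := go_eq a b 1000 0 []
  norm_num at h
  convert h using 2
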